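-- pv_equiv track=rewrite | github.com/cesbit/aiogcd | aiogcd/connector/pathelement.py | _size_var_int
-- ===== SOURCE A (Python) =====
-- def _size_var_int(n):
--     if n < 0:
--         return 10
--
--     result = 0
--     while True:
--         result += 1
--         n >>= 7
--         if n == 0:
--             break
--     return result
-- ===== SOURCE B (Python) =====
-- def _size_var_int(n):
--     if n < 0:
--         return 10
--     return max(1, (n.bit_length() + 6) // 7)
-- ===== Notes on version B (the rewrite author's own statement) =====
-- stated objective: idiomatic
-- what changed: Replaces the shift-until-zero counting loop with a closed-form expression max(1, (n.bit_length() + 6) // 7) computing the number of 7-bit groups directly.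
import Mathlib
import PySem

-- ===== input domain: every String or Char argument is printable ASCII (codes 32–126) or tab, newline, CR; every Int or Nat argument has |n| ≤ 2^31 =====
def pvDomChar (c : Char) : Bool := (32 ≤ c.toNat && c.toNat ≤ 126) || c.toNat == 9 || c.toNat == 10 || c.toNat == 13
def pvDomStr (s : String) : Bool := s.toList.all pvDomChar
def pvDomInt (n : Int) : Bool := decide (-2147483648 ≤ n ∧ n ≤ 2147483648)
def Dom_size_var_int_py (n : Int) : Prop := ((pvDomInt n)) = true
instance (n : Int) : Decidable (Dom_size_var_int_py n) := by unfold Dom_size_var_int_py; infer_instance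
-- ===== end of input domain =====

-- B replaces A's shift-until-zero counting loop with the closed form max(1, (n.bit_length()+6)//7) (idiomatic, same exact values).


-- ===== PORT A =====
-- A's while-loop; it is only entered with n ≥ 0 (negatives return 10 first), so the
-- loop state is carried as a Nat (Nat.shiftRight = Python's >> on nonnegative ints; exact there).
def pvLoopA (m : Nat) (result : Int) : Int :=
  let result := result + 1
  let m' := m >>> 7
  if m' = 0 then result else pvLoopA m' result
termination_by m
decreasing_by
  simp only [Nat.shiftRight_eq_div_pow] at *
  exact Nat.div_lt_self (by omega) (by norm_num)

def size_var_int_py (n : Int) : Int :=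
  if n < 0 then 10 else pvLoopA n.toNat 0

-- ===== PORT B =====
-- n.bit_length() for n ≥ 0 is 0 for n = 0 and Nat.log2 n + 1 otherwise.
def pvBitLength (m : Nat) : Nat := if m = 0 then 0 else Nat.log2 m + 1

def size_var_int_py_alt (n : Int) : Int :=
  if n < 0 then 10 else ((max 1 ((pvBitLength n.toNat + 6) / 7) : Nat) : Int)

-- ===== PRECONDITION & SPEC =====
def Spec_size_var_int_py (n : Int) (out : Int) : Prop := out = size_var_int_py_alt n
instance (n : Int) (out : Int) : Decidable (Spec_size_var_int_py n out) := by unfold Spec_size_var_int_py; infer_instance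

-- ===== CLAIM (what is proved, stated in full; the proofs are below) =====
def Claim_equal_size_var_int_py : Prop := ∀ (n : Int), Dom_size_var_int_py n → Spec_size_var_int_py n (size_var_int_py n)

-- ===== LEMMAS AND PROOFS =====
lemma log2_div128 (m : Nat) (_h : 128 ≤ m) : Nat.log2 (m / 128) = Nat.log2 m - 7 := by
  rw [Nat.log2_eq_log_two, Nat.log2_eq_log_two]
  have hm : m / 128 = m / 2 / 2 / 2 / 2 / 2 / 2 / 2 := by omega
  rw [hm]
  simp [Nat.log_div_base]
  omega

lemma log2_ge7 (m : Nat) (h : 128 ≤ m) : 7 ≤ Nat.log2 m :=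
  (Nat.le_log2 (by omega)).mpr (by norm_num; omega)

lemma log2_le6 (m : Nat) (h : m ≠ 0) (hlt : m < 128) : Nat.log2 m ≤ 6 := by
  by_contra hc
  have := (Nat.le_log2 h).mp (by omega : 7 ≤ Nat.log2 m)
  norm_num at this; omega

lemma pvLoopA_closed (m : Nat) : ∀ r : Int,
    pvLoopA m r = r + ((max 1 ((pvBitLength m + 6) / 7) : Nat) : Int) := by
  induction m using Nat.strong_induction_on with
  | _ m ih =>
    intro r
    rw [pvLoopA]
    simp only [Nat.shiftRight_eq_div_pow]
    by_cases h : m / 2 ^ 7 = 0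
    · rw [if_pos h]
      have hm : m < 128 := by omega
      have hbl : pvBitLength m ≤ 7 := by
        unfold pvBitLength
        split_ifs with h0
        · omega
        · have := log2_le6 m h0 hm; omega
      have : max 1 ((pvBitLength m + 6) / 7) = 1 := by omega
      rw [this]; push_cast; ring
    · rw [if_neg h]
      have h128 : 128 ≤ m := by
        by_contra hc; exact h (by omega)
      have hrec := ih (m / 2 ^ 7) (Nat.div_lt_self (by omega) (by norm_num)) (r + 1)
      rw [hrec]
      have hd : m / 2 ^ 7 = m / 128 := by norm_num
      rw [hd]
      have hL7 : 7 ≤ Nat.log2 m := log2_ge7 m h128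
      have hbl1 : pvBitLength m = Nat.log2 m + 1 := by
        unfold pvBitLength; rw [if_neg (by omega)]
      have hbl2 : pvBitLength (m / 128) = Nat.log2 m - 7 + 1 := by
        unfold pvBitLength
        rw [if_neg (by omega : ¬ m / 128 = 0), log2_div128 m h128]
      rw [hbl1, hbl2]
      have hkey : max 1 ((Nat.log2 m + 1 + 6) / 7) = 1 + max 1 ((Nat.log2 m - 7 + 1 + 6) / 7) := by
        omega
      rw [hkey]; push_cast; ring

-- ===== VERDICT (by name: the statement is the Claim_ definition above) =====
theorem size_var_int_py_spec : Claim_equal_size_var_int_py := by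
  intro n _
  unfold Spec_size_var_int_py size_var_int_py size_var_int_py_alt
  by_cases h : n < 0
  · simp [h]
  · simp only [if_neg h]
    rw [pvLoopA_closed]
    ring
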